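-- pv_equiv track=rewrite | github.com/dubgeiser/aoc2015 | 11/1.py | sensible_reset
-- ===== SOURCE A (Python) =====
-- def sensible_reset(s: str) -> str:
--     banned = ('i', 'o', 'l')
--     new = ""
--     for i in range(len(s)):
--         if s[i] in banned:
--             new += "k"
--             new += ("a" * (len(s) - i - 1))
--             break
--         else:
--             new += s[i]
--     return new
-- ===== SOURCE B (Python) =====
-- def sensible_reset(s: str) -> str:
--     idx = next((i for i, c in enumerate(s) if c in ('i', 'o', 'l')), None)
--     if idx is None:
--         return s
--     return s[:idx] + 'k' + 'a' * (len(s) - idx - 1)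
-- ===== Notes on version B (the rewrite author's own statement) =====
-- stated objective: simpler
-- what changed: Replaces the accumulate-and-break character loop with a locate-then-build decomposition: find the first banned character's index, then construct the result in one shot by slicing and padding (returning s unchanged when none is found).
import Mathlib
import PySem

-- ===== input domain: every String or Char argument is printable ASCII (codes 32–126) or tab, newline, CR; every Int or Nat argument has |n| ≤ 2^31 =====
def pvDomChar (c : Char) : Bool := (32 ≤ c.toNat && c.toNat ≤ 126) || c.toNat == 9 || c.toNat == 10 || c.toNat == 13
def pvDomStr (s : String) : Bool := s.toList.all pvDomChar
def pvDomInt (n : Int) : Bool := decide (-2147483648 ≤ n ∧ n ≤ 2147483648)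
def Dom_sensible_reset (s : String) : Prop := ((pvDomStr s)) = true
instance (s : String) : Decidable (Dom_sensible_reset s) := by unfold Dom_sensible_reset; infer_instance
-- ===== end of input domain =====

-- B replaces A's accumulate-and-break loop with locate-then-build (find first banned index, slice and pad): simpler decomposition, same O(n) cost.
-- ===== PORT A =====
-- loop body of A: walk the characters in order, appending each; on the first banned
-- char append 'k' and (len - i - 1) copies of 'a' and stop (the 'break').
def aResetGo : List Char → List Char
  | [] => []
  | c :: rest =>
    if c = 'i' ∨ c = 'o' ∨ c = 'l' then
      'k' :: List.replicate rest.length 'a'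
    else
      c :: aResetGo rest

def sensible_reset (s : String) : String :=
  String.ofList (aResetGo s.toList)

-- ===== PORT B =====
def sensible_reset_alt (s : String) : String :=
  match s.toList.findIdx? (fun c => c == 'i' || c == 'o' || c == 'l') with
  | none => s
  | some idx => String.ofList (s.toList.take idx ++ 'k' :: List.replicate (s.toList.length - idx - 1) 'a')

-- ===== PRECONDITION & SPEC =====
def Spec_sensible_reset (s : String) (out : String) : Prop := out = sensible_reset_alt s
instance (s : String) (out : String) : Decidable (Spec_sensible_reset s out) := by unfold Spec_sensible_reset; infer_instance

-- ===== CLAIM (what is proved, stated in full; the proofs are below) =====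
def Claim_equal_sensible_reset : Prop := ∀ (s : String), Dom_sensible_reset s → Spec_sensible_reset s (sensible_reset s)

-- ===== LEMMAS AND PROOFS =====

-- ===== VERDICT (by name: the statement is the Claim_ definition above) =====
theorem aResetGo_eq (cs : List Char) :
    aResetGo cs =
      match cs.findIdx? (fun c => c == 'i' || c == 'o' || c == 'l') with
      | none => cs
      | some idx => cs.take idx ++ 'k' :: List.replicate (cs.length - idx - 1) 'a' := by
  induction cs with
  | nil => simp [aResetGo]
  | cons c rest ih =>
    by_cases h : c = 'i' ∨ c = 'o' ∨ c = 'l'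
    · have hp : (c == 'i' || c == 'o' || c == 'l') = true := by
        rcases h with h | h | h <;> simp [h]
      simp [aResetGo, h, List.findIdx?_cons, hp]
    · have hp : (c == 'i' || c == 'o' || c == 'l') = false := by
        push Not at h
        simp only [Bool.or_eq_false_iff, beq_eq_false_iff_ne]
        exact ⟨⟨h.1, h.2.1⟩, h.2.2⟩
      simp only [aResetGo, if_neg h, List.findIdx?_cons, hp, Bool.false_eq_true, if_false]
      cases hf : rest.findIdx? (fun c => c == 'i' || c == 'o' || c == 'l') with
      | none =>
        rw [hf] at ih
        simp [ih]
      | some idx =>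
        rw [hf] at ih
        simp only [Option.map_some, ih, List.take_succ_cons, List.length_cons]
        have : rest.length + 1 - (idx + 1) - 1 = rest.length - idx - 1 := by omega
        rw [this, List.cons_append]

theorem sensible_reset_spec : Claim_equal_sensible_reset := by
  intro s _
  unfold Spec_sensible_reset sensible_reset sensible_reset_alt
  rw [aResetGo_eq]
  cases h : s.toList.findIdx? (fun c => c == 'i' || c == 'o' || c == 'l') with
  | none => simp only [h]; exact String.ofList_toList
  | some idx => simp only [h]
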